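-- pv_equiv track=rewrite | github.com/rayyan-khan/5-hexagons | hexQ2Drawing.py | copies
-- ===== SOURCE A (Python) =====
-- def copies(tpl): # checks for copies within subhexagons
--     seen = set()
--     for label in tpl:
--         if label != '.':
--             if label in seen:
--                 return True  # true if it finds a copied label
--             else:
--                 seen.add(label)
--     return False  # otherwise it's still valid
-- ===== SOURCE B (Python) =====
-- def copies(tpl): # checks for copies within subhexagons
--     labels = sorted(label for label in tpl if label != '.')
--     return any(a == b for a, b in zip(labels, labels[1:]))
-- ===== Notes on version B (the rewrite author's own statement) =====
-- stated objective: alternative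
-- what changed: Replaced A's incremental seen-set with early return by a sort-based method: sort the non-dot labels and report a duplicate iff some adjacent pair in the sorted order is equal; no set or membership test is used.
import Mathlib
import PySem

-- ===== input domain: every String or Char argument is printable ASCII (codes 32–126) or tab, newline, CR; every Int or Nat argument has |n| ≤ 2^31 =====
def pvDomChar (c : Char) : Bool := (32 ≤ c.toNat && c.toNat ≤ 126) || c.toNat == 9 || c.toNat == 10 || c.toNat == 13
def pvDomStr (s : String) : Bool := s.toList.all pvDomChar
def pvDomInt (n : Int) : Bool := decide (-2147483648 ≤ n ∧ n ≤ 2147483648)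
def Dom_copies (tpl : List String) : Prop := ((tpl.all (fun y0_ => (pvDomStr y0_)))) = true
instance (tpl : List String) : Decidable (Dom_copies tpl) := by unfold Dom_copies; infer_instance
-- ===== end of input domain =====

-- B uses a different algorithm: sort the non-dot labels and look for an equal adjacent pair (no set, no membership test).

-- ===== PORT A =====
-- the for-loop with the growing `seen` set and early return True
def copiesLoop : List String → PySem.Set String → Bool
  | [], _ => false
  | label :: rest, seen =>
      if label ≠ "." then
        if PySem.Set.contains seen label then true
        else copiesLoop rest (PySem.Set.add seen label)
      else copiesLoop rest seen

def copies (tpl : List String) : Bool := copiesLoop tpl PySem.Set.empty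

-- ===== PORT B =====
def copies_alt (tpl : List String) : Bool :=
  let labels := PySem.List.sorted (tpl.filter (fun label => label ≠ ".")) (fun x => x) false
  (labels.zip (labels.drop 1)).any (fun p => p.1 == p.2)

-- ===== PRECONDITION & SPEC =====
def Spec_copies (tpl : List String) (out : Bool) : Prop := out = copies_alt tpl
instance (tpl : List String) (out : Bool) : Decidable (Spec_copies tpl out) := by unfold Spec_copies; infer_instance

-- ===== CLAIM (what is proved, stated in full; the proofs are below) =====
def Claim_equal_copies : Prop := ∀ (tpl : List String), Dom_copies tpl → Spec_copies tpl (copies tpl)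

-- ===== LEMMAS AND PROOFS =====

theorem contains_iff_mem (s : PySem.Set String) (x : String) :
    PySem.Set.contains s x = true ↔ x ∈ s := by
  simp [PySem.Set.contains]

theorem mem_add_iff (s : PySem.Set String) (x y : String) :
    y ∈ PySem.Set.add s x ↔ y ∈ s ∨ y = x := by
  unfold PySem.Set.add
  split_ifs with h
  · rw [contains_iff_mem] at h
    constructor
    · exact Or.inl
    · rintro (hy | rfl) <;> assumption
  · simp

-- A's loop returns false iff the remaining non-dot labels are distinct and disjoint from `seen`
theorem copiesLoop_char (xs : List String) (seen : PySem.Set String) :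
    copiesLoop xs seen
      = !decide ((xs.filter (fun l => l ≠ ".")).Nodup ∧
          ∀ x ∈ xs.filter (fun l => l ≠ "."), ¬ x ∈ seen) := by
  induction xs generalizing seen with
  | nil => simp [copiesLoop]
  | cons l rest ih =>
    by_cases hdot : l = "."
    · simp [copiesLoop, hdot, ih]
    · by_cases hm : l ∈ seen
      · have hL : copiesLoop (l :: rest) seen = true := by simp [copiesLoop, hdot, hm]
        rw [hL]; symm
        simp only [Bool.not_eq_true', decide_eq_false_iff_not]
        rintro ⟨-, hall⟩
        exact hall l (by simp [hdot]) hm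
      · rw [show copiesLoop (l :: rest) seen = copiesLoop rest (PySem.Set.add seen l) by
          simp [copiesLoop, hdot, hm]]
        rw [ih]
        congr 1
        apply decide_eq_decide.mpr
        have hfc : (l :: rest).filter (fun l => l ≠ ".") = l :: rest.filter (fun l => l ≠ ".") := by
          simp [hdot]
        rw [hfc]
        simp only [List.nodup_cons, mem_add_iff, not_or, List.mem_cons, forall_eq_or_imp]
        constructor
        · rintro ⟨hnd, hall⟩
          exact ⟨⟨fun h => (hall l h).2 rfl, hnd⟩, hm, fun a ha => (hall a ha).1⟩
        · rintro ⟨⟨hnl, hnd⟩, -, hall⟩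
          exact ⟨hnd, fun x hx => ⟨hall x hx, fun h => hnl (h ▸ hx)⟩⟩

-- for a ≤-sorted list, an equal adjacent pair exists iff the list has a duplicate
theorem adj_eq_iff_not_nodup (ys : List String) (hp : ys.Pairwise (· ≤ ·)) :
    ((ys.zip (ys.drop 1)).any (fun p => p.1 == p.2)) = !decide ys.Nodup := by
  induction ys with
  | nil => simp
  | cons a ys ih =>
    cases ys with
    | nil => simp
    | cons b rest =>
      have hp' : (b :: rest).Pairwise (· ≤ ·) := hp.tail
      have ihd := ih hp'
      simp only [List.drop_succ_cons, List.drop_zero, List.zip_cons_cons, List.any_cons] at ihd ⊢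
      by_cases hab : a = b
      · subst hab
        have : ¬ (a :: a :: rest).Nodup := by simp
        simp [this]
      · have hne : (a == b) = false := by simpa using hab
        rw [hne, Bool.false_or, ihd]
        have hnotmem : a ∉ b :: rest := by
          have hab_le : a ≤ b := (List.pairwise_cons.mp hp).1 b (by simp)
          have halt : a < b := lt_of_le_of_ne hab_le hab
          intro hmem
          rcases List.mem_cons.mp hmem with rfl | hmem'
          · exact hab rfl
          · have : b ≤ a := (List.pairwise_cons.mp hp').1 a hmem'
            exact absurd (lt_of_lt_of_le halt this) (lt_irrefl a)
        have : (a :: b :: rest).Nodup ↔ (b :: rest).Nodup := by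
          simp [List.nodup_cons, hnotmem]
        by_cases h : (b :: rest).Nodup
        · simp [h, this.mpr h]
        · simp [h, fun hc => h (this.mp hc)]

-- ===== VERDICT (by name: the statement is the Claim_ definition above) =====
theorem copies_spec : Claim_equal_copies := by
  intro tpl _
  unfold Spec_copies copies copies_alt
  rw [copiesLoop_char]
  set filtered := tpl.filter (fun l => l ≠ ".") with hf
  set labels := PySem.List.sorted filtered (fun x => x) false with hl
  have hperm : labels.Perm filtered := PySem.List.sorted_perm filtered (fun x => x) false
  have hpw : labels.Pairwise (· ≤ ·) := by
    simpa using PySem.List.sorted_pairwise filtered (fun x => x)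
  rw [adj_eq_iff_not_nodup labels hpw]
  have hnd : labels.Nodup ↔ filtered.Nodup := hperm.nodup_iff
  simp only [PySem.Set.empty, List.not_mem_nil, not_false_iff, imp_true_iff, and_true]
  by_cases h : filtered.Nodup
  · simp [h, hnd.mpr h]
  · have : ¬ labels.Nodup := fun hc => h (hnd.mp hc)
    simp [h, this]
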